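-- pv_equiv track=rewrite | github.com/Anel49/CIS112 | P5/solution/P5.py | storms_by_years
-- ===== SOURCE A (Python) =====
-- def storms_by_years(db, years):
--
--     temp = {}
--     storm_years = {}
--
--     # iterates through the input 'years', checking if i == years and, if so,
--     # updates 'temp' with db's key and values
--     for year in years:
--         for y in db:
--             if year == y:
--                 temp.update({y: db[y]})
--     # updates and returns 'storm_years' in the format of a sorted 'db', in case
--     # the years inputted were out of chronological order
--     for y in sorted(temp):
--         storm_years.update({y: db[y]})
--
--     return storm_years
-- ===== SOURCE B (Python) =====
-- def storms_by_years(db, years):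
--     yset = set(years)
--     return {y: db[y] for y in sorted(db) if y in yset}
-- ===== Notes on version B (the rewrite author's own statement) =====
-- stated objective: faster
-- what changed: B builds a membership set of the requested years once and does a single pass over sorted(db), replacing A's nested years-by-db scan plus separate sort-and-rebuild pass.
import Mathlib
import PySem

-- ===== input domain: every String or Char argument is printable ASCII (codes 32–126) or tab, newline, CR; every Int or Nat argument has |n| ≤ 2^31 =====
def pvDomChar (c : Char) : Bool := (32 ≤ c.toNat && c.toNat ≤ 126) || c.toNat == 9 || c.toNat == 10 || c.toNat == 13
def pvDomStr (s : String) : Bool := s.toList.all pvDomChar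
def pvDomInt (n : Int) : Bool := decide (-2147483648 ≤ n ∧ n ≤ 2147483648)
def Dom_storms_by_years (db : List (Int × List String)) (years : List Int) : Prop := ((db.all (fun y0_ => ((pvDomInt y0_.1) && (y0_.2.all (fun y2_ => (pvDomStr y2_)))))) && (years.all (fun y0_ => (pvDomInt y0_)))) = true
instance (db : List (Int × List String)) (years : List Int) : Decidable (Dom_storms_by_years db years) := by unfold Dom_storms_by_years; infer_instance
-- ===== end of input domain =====

-- B: one membership set of the years and a single pass over sorted(db), instead of A's nested
-- years×db scan followed by a second sort-and-rebuild pass; return value only (no mutation).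

-- ===== PORT A =====
-- db is a Python dict: materialise it as a PySem.Dict (insertion order, overwrite).
-- 'db[y]' is ported as getD with default [], exact here because y is always a key of db.
def storms_by_years (db : List (Int × List String)) (years : List Int) : List (Int × List String) :=
  let d : PySem.Dict Int (List String) := PySem.Dict.ofList db
  let temp : PySem.Dict Int (List String) :=
    years.foldl (fun temp year =>
      d.keys.foldl (fun temp y =>
        if year == y then temp.insert y (d.getD y []) else temp) temp)
      PySem.Dict.empty
  let storm_years : PySem.Dict Int (List String) :=
    (PySem.List.sorted temp.keys (fun x => x) false).foldl
      (fun s y => s.insert y (d.getD y [])) PySem.Dict.empty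
  storm_years.items

-- ===== PORT B =====
def storms_by_years_alt (db : List (Int × List String)) (years : List Int) : List (Int × List String) :=
  let d : PySem.Dict Int (List String) := PySem.Dict.ofList db
  let yset : PySem.Set Int := PySem.Set.ofList years
  ((PySem.List.sorted d.keys (fun x => x) false).foldl
      (fun s y => if PySem.Set.contains yset y then s.insert y (d.getD y []) else s)
      (PySem.Dict.empty : PySem.Dict Int (List String))).items

-- ===== PRECONDITION & SPEC =====
def Spec_storms_by_years (db : List (Int × List String)) (years : List Int) (out : List (Int × List String)) : Prop := out = storms_by_years_alt db years
instance (db : List (Int × List String)) (years : List Int) (out : List (Int × List String)) : Decidable (Spec_storms_by_years db years out) := by unfold Spec_storms_by_years; infer_instance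

-- ===== CLAIM (what is proved, stated in full; the proofs are below) =====
def Claim_equal_storms_by_years : Prop := ∀ (db : List (Int × List String)) (years : List Int), Dom_storms_by_years db years → Spec_storms_by_years db years (storms_by_years db years)

-- ===== LEMMAS AND PROOFS =====

-- A fold of conditional fresh inserts appends the filtered pairs.
theorem items_foldl_if_insert (l : List Int) (p : Int → Bool) (v : Int → List String)
    (d : PySem.Dict Int (List String)) (hl : l.Nodup) (hf : ∀ a ∈ l, d.contains a = false) :
    (l.foldl (fun s y => if p y then s.insert y (v y) else s) d).items
      = d.items ++ (l.filter p).map (fun y => (y, v y)) := by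
  induction l generalizing d with
  | nil => simp
  | cons x xs ih =>
    rcases List.nodup_cons.mp hl with ⟨hx, hxs⟩
    have hdx := hf x (by simp)
    simp only [List.foldl_cons, List.filter_cons]
    by_cases hp : p x = true
    · rw [if_pos hp, if_pos hp, ih _ hxs]
      · rw [PySem.Dict.items_insert_of_not_contains _ _ hdx]; simp
      · intro a ha
        rw [PySem.Dict.contains_insert]
        have hne : (a == x) = false := by
          simp only [beq_eq_false_iff_ne]; rintro rfl; exact hx ha
        simp [hne, hf a (List.mem_cons_of_mem _ ha)]
    · rw [if_neg hp, if_neg hp, ih _ hxs (fun a ha => hf a (List.mem_cons_of_mem _ ha))]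

-- membership in the keys after the inner fold of A
theorem mem_keys_inner (ks : List Int) (year : Int) (v : Int → List String)
    (t : PySem.Dict Int (List String)) (a : Int) :
    a ∈ (ks.foldl (fun t y => if year == y then t.insert y (v y) else t) t).keys
      ↔ a ∈ t.keys ∨ (a ∈ ks ∧ year = a) := by
  induction ks generalizing t with
  | nil => simp
  | cons x xs ih =>
    simp only [List.foldl_cons]
    by_cases h : year = x
    · rw [if_pos (by simp [h])]
      rw [ih]
      simp only [PySem.Dict.mem_keys_insert, List.mem_cons]
      constructor
      · rintro (⟨rfl | ha⟩) <;> tauto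
      · rintro (ha | ⟨(rfl | ha), rfl⟩) <;> tauto
    · rw [if_neg (by simp [h])]
      rw [ih]
      constructor
      · rintro (ha | ⟨ha, rfl⟩) <;> simp_all
      · rintro (ha | ⟨ha, hya⟩)
        · tauto
        · subst hya
          rcases List.mem_cons.mp ha with rfl | ha
          · exact absurd rfl h
          · tauto
  
theorem nodup_keys_inner (ks : List Int) (year : Int) (v : Int → List String)
    (t : PySem.Dict Int (List String)) (ht : t.keys.Nodup) :
    (ks.foldl (fun t y => if year == y then t.insert y (v y) else t) t).keys.Nodup := by
  induction ks generalizing t with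
  | nil => exact ht
  | cons x xs ih =>
    simp only [List.foldl_cons]
    by_cases h : (year == x) = true
    · rw [if_pos h]; exact ih _ (PySem.Dict.nodup_keys_insert _ _ _ ht)
    · rw [if_neg h]; exact ih _ ht

theorem mem_keys_temp (years ks : List Int) (v : Int → List String)
    (t : PySem.Dict Int (List String)) (a : Int) :
    a ∈ (years.foldl (fun t year =>
          ks.foldl (fun t y => if year == y then t.insert y (v y) else t) t) t).keys
      ↔ a ∈ t.keys ∨ (a ∈ ks ∧ a ∈ years) := by
  induction years generalizing t with
  | nil => simp
  | cons yr yrs ih =>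
    simp only [List.foldl_cons]
    rw [ih]
    rw [mem_keys_inner]
    constructor
    · rintro ((ha | ⟨ha, rfl⟩) | ⟨ha, hy⟩) <;> simp_all
    · rintro (ha | ⟨ha, hy⟩)
      · tauto
      · rcases List.mem_cons.mp hy with rfl | hy
        · exact Or.inl (Or.inr ⟨ha, rfl⟩)
        · tauto

theorem nodup_keys_temp (years ks : List Int) (v : Int → List String)
    (t : PySem.Dict Int (List String)) (ht : t.keys.Nodup) :
    (years.foldl (fun t year =>
          ks.foldl (fun t y => if year == y then t.insert y (v y) else t) t) t).keys.Nodup := by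
  induction years generalizing t with
  | nil => exact ht
  | cons yr yrs ih => exact ih _ (nodup_keys_inner _ _ _ _ ht)

-- an unconditional fresh-insert fold appends all pairs
theorem items_foldl_insert_all (l : List Int) (v : Int → List String)
    (d : PySem.Dict Int (List String)) (hl : l.Nodup) (hf : ∀ a ∈ l, d.contains a = false) :
    (l.foldl (fun s y => s.insert y (v y)) d).items = d.items ++ l.map (fun y => (y, v y)) := by
  induction l generalizing d with
  | nil => simp
  | cons x xs ih =>
    rcases List.nodup_cons.mp hl with ⟨hx, hxs⟩
    simp only [List.foldl_cons, List.map_cons]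
    rw [ih _ hxs]
    · rw [PySem.Dict.items_insert_of_not_contains _ _ (hf x (by simp))]
      simp
    · intro a ha
      rw [PySem.Dict.contains_insert]
      have hne : (a == x) = false := by
        simp only [beq_eq_false_iff_ne]; rintro rfl; exact hx ha
      simp [hne, hf a (List.mem_cons_of_mem _ ha)]

-- ===== VERDICT (by name: the statement is the Claim_ definition above) =====
theorem storms_by_years_spec : Claim_equal_storms_by_years := by
  intro db years _
  unfold Spec_storms_by_years storms_by_years storms_by_years_alt
  simp only []
  set d : PySem.Dict Int (List String) := PySem.Dict.ofList db with hd
  have hnd : d.keys.Nodup := PySem.Dict.nodup_keys_ofList db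
  have hnodupks : (PySem.List.sorted d.keys (fun x => x) false).Nodup :=
    (PySem.List.sorted_perm d.keys (fun x => x) false).nodup_iff.mpr hnd
  set temp : PySem.Dict Int (List String) :=
    years.foldl (fun temp year =>
      d.keys.foldl (fun temp y =>
        if year == y then temp.insert y (d.getD y []) else temp) temp)
      PySem.Dict.empty with htemp
  have htk : ∀ a, a ∈ temp.keys ↔ a ∈ d.keys ∧ a ∈ years := by
    intro a
    rw [htemp, mem_keys_temp years d.keys (fun y => d.getD y []) PySem.Dict.empty a]
    simp [PySem.Dict.keys_empty]
  have htn : temp.keys.Nodup := by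
    rw [htemp]
    exact nodup_keys_temp _ _ _ _ (by simp [PySem.Dict.keys_empty])
  have hsortedkeys :
      PySem.List.sorted temp.keys (fun x => x) false
        = (PySem.List.sorted d.keys (fun x => x) false).filter (fun y => decide (y ∈ years)) := by
    apply PySem.List.sorted_eq_of_perm_of_pairwise_lt
    · rw [List.perm_ext_iff_of_nodup (hnodupks.filter _) htn]
      intro a
      rw [htk, List.mem_filter]
      simp [PySem.List.mem_sorted]
    · have hp := PySem.List.sorted_pairwise d.keys (fun x => x)
      have hlt : (PySem.List.sorted d.keys (fun x => x) false).Pairwise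
          (fun a b => (fun x => x) a < (fun x => x) b) :=
        (hp.and hnodupks).imp (fun {a b} h => lt_of_le_of_ne h.1 h.2)
      exact hlt.filter _
  rw [hsortedkeys]
  rw [items_foldl_insert_all _ _ _ (hnodupks.filter _) (by simp)]
  rw [items_foldl_if_insert _ _ _ _ hnodupks (by simp)]
  congr 1
  congr 1
  apply List.filter_congr
  intro a _
  by_cases h : a ∈ years <;>
    simp [PySem.Set.mem_ofList, h]
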